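-- pv_equiv track=rewrite | github.com/gaw3568/Coding-Test | 프로그래머스/lv1/1845. 폰켓몬/폰켓몬.py | solution
-- ===== SOURCE A (Python) =====
-- def solution(nums):
--     max_kind = 0
--     length = len(nums) // 2
--     nums = set(nums)
--
--     for i in nums:
--         if max_kind < length:
--             max_kind += 1
--
--     return max_kind
-- ===== SOURCE B (Python) =====
-- def solution(nums):
--     return min(len(set(nums)), len(nums) // 2)
-- ===== Notes on version B (the rewrite author's own statement) =====
-- stated objective: simpler
-- what changed: Replaces the per-element counting loop over the set with the closed form min(len(set(nums)), len(nums)//2).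
import Mathlib
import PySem

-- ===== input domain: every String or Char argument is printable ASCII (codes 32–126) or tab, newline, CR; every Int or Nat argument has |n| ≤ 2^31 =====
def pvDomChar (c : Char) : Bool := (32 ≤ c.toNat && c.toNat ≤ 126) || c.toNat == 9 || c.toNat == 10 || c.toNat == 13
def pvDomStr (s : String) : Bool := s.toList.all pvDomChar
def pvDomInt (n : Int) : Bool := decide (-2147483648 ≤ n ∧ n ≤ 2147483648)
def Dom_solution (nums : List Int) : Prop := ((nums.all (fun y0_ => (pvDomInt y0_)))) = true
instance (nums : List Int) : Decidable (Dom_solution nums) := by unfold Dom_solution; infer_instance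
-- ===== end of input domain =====

-- B replaces A's counting loop over the set with the closed form min(|set(nums)|, len(nums)//2); objective: simpler.

-- ===== PORT A =====
-- counting loop over set(nums): max_kind += 1 while max_kind < length
def solution (nums : List Int) : Int :=
  let length : Int := PySem.Int.floordiv (nums.length : Int) 2
  let s : PySem.Set Int := PySem.Set.ofList nums
  s.foldl (fun max_kind _ => if max_kind < length then max_kind + 1 else max_kind) 0

-- ===== PORT B =====
def solution_alt (nums : List Int) : Int :=
  min (PySem.Set.len (PySem.Set.ofList nums)) (PySem.Int.floordiv (nums.length : Int) 2)

-- ===== PRECONDITION & SPEC =====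
def Spec_solution (nums : List Int) (out : Int) : Prop := out = solution_alt nums
instance (nums : List Int) (out : Int) : Decidable (Spec_solution nums out) := by unfold Spec_solution; infer_instance

-- ===== CLAIM (what is proved, stated in full; the proofs are below) =====
def Claim_equal_solution : Prop := ∀ (nums : List Int), Dom_solution nums → Spec_solution nums (solution nums)

-- ===== LEMMAS AND PROOFS =====

theorem pv_loop_min (s : List Int) (L : Int) :
    ∀ (k : Int), k ≤ L →
      s.foldl (fun m _ => if m < L then m + 1 else m) k = min (k + s.length) L := by
  induction s with
  | nil => intro k hk; simp; omega
  | cons x t ih =>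
    intro k hk
    simp only [List.foldl_cons, List.length_cons]
    by_cases h : k < L
    · rw [if_pos h, ih (k + 1) (by omega)]
      push_cast; omega
    · rw [if_neg h, ih k hk]
      push_cast; omega

-- ===== VERDICT (by name: the statement is the Claim_ definition above) =====
theorem solution_spec : Claim_equal_solution := by
  intro nums _
  unfold Spec_solution solution solution_alt
  simp only []
  rw [pv_loop_min _ _ 0 (by rw [PySem.Int.floordiv_eq_ediv_of_pos (by omega)]; positivity)]
  simp [PySem.Set.len, min_comm]
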